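-- pv_equiv track=rewrite | github.com/ZM-Kimu/Blue-Archive-Asset-Downloader | scripts/update_changelog.py | _load_changelog_sections
-- ===== SOURCE A (Python) =====
-- CHANGELOG_TITLE = "# Changelog"
--
-- def _load_changelog_sections(content: str) -> tuple[str, list[tuple[str, str]]]:
--     normalized = content.replace("\r\n", "\n")
--     lines = normalized.split("\n")
--     header_lines: list[str] = []
--     sections: list[tuple[str, str]] = []
--     current_title: str | None = None
--     current_lines: list[str] = []
--
--     for line in lines:
--         if line.startswith("## "):
--             if current_title is not None:
--                 sections.append((current_title, "\n".join(current_lines).strip()))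
--             current_title = line[3:].strip()
--             current_lines = []
--             continue
--
--         if current_title is None:
--             header_lines.append(line)
--         else:
--             current_lines.append(line)
--
--     if current_title is None:
--         return (("\n".join(header_lines).strip() or CHANGELOG_TITLE), [])
--
--     sections.append((current_title, "\n".join(current_lines).strip()))
--     return (("\n".join(header_lines).strip() or CHANGELOG_TITLE), sections)
-- ===== SOURCE B (Python) =====
-- CHANGELOG_TITLE = "# Changelog"
--
-- def _split_at_mark(lines):
--     # (lines before the first '## ' line, remainder starting at that line)
--     for i, line in enumerate(lines):
--         if line.startswith("## "):
--             return lines[:i], lines[i:]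
--     return lines, []
--
-- def _parse_sections(lines):
--     # lines starts with a '## ' line (or is empty)
--     if not lines:
--         return []
--     title = lines[0][3:].strip()
--     body, rest = _split_at_mark(lines[1:])
--     return [(title, "\n".join(body).strip())] + _parse_sections(rest)
--
-- def _load_changelog_sections(content: str) -> tuple[str, list[tuple[str, str]]]:
--     lines = content.replace("\r\n", "\n").split("\n")
--     head, rest = _split_at_mark(lines)
--     header = "\n".join(head).strip() or CHANGELOG_TITLE
--     return (header, _parse_sections(rest))
-- ===== Notes on version B (the rewrite author's own statement) =====
-- stated objective: alternative
-- what changed: Replaced the stateful line-by-line accumulator (current_title/current_lines flags with per-line branching) with recursive descent: a helper splits the line list at the first section-heading line, the header is the prefix, and sections are produced by repeatedly taking a title line and splitting off its body at the next heading.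
import Mathlib
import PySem

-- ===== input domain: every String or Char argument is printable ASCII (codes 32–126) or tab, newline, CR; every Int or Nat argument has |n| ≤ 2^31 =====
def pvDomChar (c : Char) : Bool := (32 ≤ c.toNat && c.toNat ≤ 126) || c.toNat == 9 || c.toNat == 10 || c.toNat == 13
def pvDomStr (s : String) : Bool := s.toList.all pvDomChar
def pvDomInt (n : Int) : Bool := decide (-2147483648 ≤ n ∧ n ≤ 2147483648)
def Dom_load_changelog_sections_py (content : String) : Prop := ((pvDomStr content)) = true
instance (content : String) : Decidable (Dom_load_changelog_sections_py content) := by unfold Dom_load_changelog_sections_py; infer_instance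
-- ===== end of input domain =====

-- B replaces A's stateful line-by-line accumulator with recursive descent (split at each '## ' mark, then pair titles with bodies); same cost, different decomposition.

-- ===== PORT A =====
-- loop state: (header_lines, sections, current_title, current_lines)
def pvStepA (st : List String × List (String × String) × Option String × List String)
    (line : String) : List String × List (String × String) × Option String × List String :=
  if PySem.Str.startswith line "## " then
    match st.2.2.1 with
    | some t =>
        (st.1, st.2.1 ++ [(t, PySem.Str.strip (PySem.Str.join "\n" st.2.2.2))],
         some (PySem.Str.strip (PySem.Str.slice line (some 3) none)), [])
    | none =>
        (st.1, st.2.1, some (PySem.Str.strip (PySem.Str.slice line (some 3) none)), [])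
  else
    match st.2.2.1 with
    | none => (st.1 ++ [line], st.2.1, st.2.2.1, st.2.2.2)
    | some _ => (st.1, st.2.1, st.2.2.1, st.2.2.2 ++ [line])

-- the body of A after 'lines' is computed (fold over the lines, then the final returns)
def pvLoadA (lines : List String) : String × (List (String × String)) :=
  let st := List.foldl pvStepA ([], [], none, []) lines
  let h := PySem.Str.strip (PySem.Str.join "\n" st.1)
  let header := if h = "" then "# Changelog" else h
  match st.2.2.1 with
  | none => (header, [])
  | some t => (header, st.2.1 ++ [(t, PySem.Str.strip (PySem.Str.join "\n" st.2.2.2))])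

def load_changelog_sections_py (content : String) : String × (List (String × String)) :=
  -- split? is some because the separator "\n" is nonempty
  pvLoadA ((PySem.Str.split? (PySem.Str.replace content "\r\n" "\n") "\n").getD [])

-- ===== PORT B =====
-- _split_at_mark: (lines before the first '## ' line, remainder starting at that line)
def pvSplitAtMark : List String → List String × List String
  | [] => ([], [])
  | l :: ls =>
      if PySem.Str.startswith l "## " then ([], l :: ls)
      else (l :: (pvSplitAtMark ls).1, (pvSplitAtMark ls).2)

theorem pvSplitAtMark_snd_le (ls : List String) : (pvSplitAtMark ls).2.length ≤ ls.length := by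
  induction ls with
  | nil => simp [pvSplitAtMark]
  | cons l ls ih =>
      simp only [pvSplitAtMark]
      split
      · simp
      · simpa using Nat.le_succ_of_le ih

-- _parse_sections: while lines: take the title line, split the rest at the next mark
def pvParseLoop (lines : List String) (acc : List (String × String)) : List (String × String) :=
  match lines with
  | [] => acc
  | l :: ls =>
      pvParseLoop (pvSplitAtMark ls).2
        (acc ++ [(PySem.Str.strip (PySem.Str.slice l (some 3) none),
                  PySem.Str.strip (PySem.Str.join "\n" (pvSplitAtMark ls).1))])
termination_by lines.length
decreasing_by
  have := pvSplitAtMark_snd_le ls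
  simp
  omega

def pvLoadB (lines : List String) : String × (List (String × String)) :=
  let p := pvSplitAtMark lines
  let h := PySem.Str.strip (PySem.Str.join "\n" p.1)
  let header := if h = "" then "# Changelog" else h
  (header, pvParseLoop p.2 [])

def load_changelog_sections_py_alt (content : String) : String × (List (String × String)) :=
  pvLoadB ((PySem.Str.split? (PySem.Str.replace content "\r\n" "\n") "\n").getD [])

-- ===== PRECONDITION & SPEC =====
def Spec_load_changelog_sections_py (content : String) (out : String × (List (String × String))) : Prop := out = load_changelog_sections_py_alt content
instance (content : String) (out : String × (List (String × String))) : Decidable (Spec_load_changelog_sections_py content out) := by unfold Spec_load_changelog_sections_py; infer_instance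

-- ===== CLAIM (what is proved, stated in full; the proofs are below) =====
def Claim_equal_load_changelog_sections_py : Prop := ∀ (content : String), Dom_load_changelog_sections_py content → Spec_load_changelog_sections_py content (load_changelog_sections_py content)

-- ===== LEMMAS AND PROOFS =====

-- the sections A's final 'return' produces from a loop state
def pvFinishSecs (st : List String × List (String × String) × Option String × List String) :
    List (String × String) :=
  match st.2.2.1 with
  | none => st.2.1
  | some t => st.2.1 ++ [(t, PySem.Str.strip (PySem.Str.join "\n" st.2.2.2))]

theorem pvParseLoop_acc (lines : List String) (acc : List (String × String)) :
    pvParseLoop lines acc = acc ++ pvParseLoop lines [] := by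
  have H : ∀ n (lines : List String), lines.length = n →
      ∀ acc, pvParseLoop lines acc = acc ++ pvParseLoop lines [] := by
    intro n
    induction n using Nat.strong_induction_on with
    | _ n ih =>
      intro lines hlen acc
      match lines with
      | [] => simp [pvParseLoop]
      | l :: ls =>
        rw [pvParseLoop, pvParseLoop]
        have hlt : (pvSplitAtMark ls).2.length < n := by
          have := pvSplitAtMark_snd_le ls
          subst hlen
          simp
          omega
        conv_lhs => rw [ih _ hlt _ rfl]
        conv_rhs => rw [ih _ hlt _ rfl]
        simp
  exact H _ lines rfl acc

theorem pvParseLoop_cons (l : String) (ls : List String) :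
    pvParseLoop (l :: ls) []
      = (PySem.Str.strip (PySem.Str.slice l (some 3) none),
         PySem.Str.strip (PySem.Str.join "\n" (pvSplitAtMark ls).1))
          :: pvParseLoop (pvSplitAtMark ls).2 [] := by
  rw [pvParseLoop]
  rw [pvParseLoop_acc]
  simp

theorem pvSplitAtMark_cons_pos (l : String) (ls : List String)
    (hl : PySem.Str.startswith l "## " = true) :
    pvSplitAtMark (l :: ls) = ([], l :: ls) := by
  rw [pvSplitAtMark, if_pos hl]

theorem pvSplitAtMark_cons_neg (l : String) (ls : List String)
    (hl : ¬ PySem.Str.startswith l "## " = true) :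
    pvSplitAtMark (l :: ls) = (l :: (pvSplitAtMark ls).1, (pvSplitAtMark ls).2) := by
  rw [pvSplitAtMark, if_neg hl]

theorem pv_fold_some (lines : List String) : ∀ hdr secs t curl,
    (List.foldl pvStepA (hdr, secs, some t, curl) lines).1 = hdr
    ∧ ((List.foldl pvStepA (hdr, secs, some t, curl) lines).2.2.1).isSome = true
    ∧ pvFinishSecs (List.foldl pvStepA (hdr, secs, some t, curl) lines)
        = secs ++ (t, PySem.Str.strip (PySem.Str.join "\n" (curl ++ (pvSplitAtMark lines).1)))
            :: pvParseLoop (pvSplitAtMark lines).2 [] := by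
  induction lines with
  | nil =>
      intro hdr secs t curl
      simp [pvSplitAtMark, pvParseLoop, pvFinishSecs]
  | cons l ls ih =>
      intro hdr secs t curl
      by_cases hl : PySem.Str.startswith l "## " = true
      · simp only [List.foldl, pvStepA, hl, if_pos]
        obtain ⟨h1, h2, h3⟩ := ih hdr
          (secs ++ [(t, PySem.Str.strip (PySem.Str.join "\n" curl))])
          (PySem.Str.strip (PySem.Str.slice l (some 3) none)) []
        refine ⟨h1, h2, ?_⟩
        rw [h3]
        rw [pvSplitAtMark_cons_pos l ls hl, pvParseLoop_cons]
        simp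
      · simp only [List.foldl, pvStepA, hl, if_neg, Bool.not_eq_true]
        obtain ⟨h1, h2, h3⟩ := ih hdr secs t (curl ++ [l])
        refine ⟨h1, h2, ?_⟩
        rw [h3]
        rw [pvSplitAtMark_cons_neg l ls hl]
        simp

theorem pv_fold_none (lines : List String) : ∀ hdr,
    (List.foldl pvStepA (hdr, [], none, []) lines).1 = hdr ++ (pvSplitAtMark lines).1
    ∧ pvFinishSecs (List.foldl pvStepA (hdr, [], none, []) lines)
        = pvParseLoop (pvSplitAtMark lines).2 []
    ∧ ((List.foldl pvStepA (hdr, [], none, []) lines).2.2.1 = none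
        ↔ (pvSplitAtMark lines).2 = []) := by
  induction lines with
  | nil =>
      intro hdr
      simp [pvSplitAtMark, pvParseLoop, pvFinishSecs]
  | cons l ls ih =>
      intro hdr
      by_cases hl : PySem.Str.startswith l "## " = true
      · simp only [List.foldl, pvStepA, hl, if_pos]
        obtain ⟨h1, h2, h3⟩ := pv_fold_some ls hdr []
          (PySem.Str.strip (PySem.Str.slice l (some 3) none)) []
        rw [pvSplitAtMark_cons_pos l ls hl]
        refine ⟨by simpa using h1, ?_, ?_⟩
        · rw [h3, pvParseLoop_cons]
          simp
        · constructor
          · intro hnone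
            rw [Option.isSome_iff_ne_none] at h2
            exact absurd hnone h2
          · intro h
            exact absurd h (by simp)
      · simp only [List.foldl, pvStepA, hl, if_neg, Bool.not_eq_true]
        obtain ⟨h1, h2, h3⟩ := ih (hdr ++ [l])
        rw [pvSplitAtMark_cons_neg l ls hl]
        refine ⟨?_, h2, h3⟩
        rw [h1]
        simp

theorem pvLoad_eq (lines : List String) : pvLoadA lines = pvLoadB lines := by
  obtain ⟨h1, h2, h3⟩ := pv_fold_none lines []
  unfold pvLoadA pvLoadB
  simp only []
  cases hc : (List.foldl pvStepA ([], [], none, []) lines).2.2.1 with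
  | none =>
      have hsnd : (pvSplitAtMark lines).2 = [] := h3.mp hc
      rw [h1, hsnd]
      simp [pvParseLoop]
  | some t =>
      have : pvFinishSecs (List.foldl pvStepA ([], [], none, []) lines)
          = (List.foldl pvStepA ([], [], none, []) lines).2.1
            ++ [(t, PySem.Str.strip (PySem.Str.join "\n"
                  (List.foldl pvStepA ([], [], none, []) lines).2.2.2))] := by
        unfold pvFinishSecs
        rw [hc]
      rw [h1]
      simp only [List.nil_append]
      rw [← h2, this]

-- ===== VERDICT (by name: the statement is the Claim_ definition above) =====
theorem load_changelog_sections_py_spec : Claim_equal_load_changelog_sections_py := by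
  intro content _
  unfold Spec_load_changelog_sections_py load_changelog_sections_py load_changelog_sections_py_alt
  exact pvLoad_eq _
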